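-- pv_equiv track=rewrite | github.com/SpiraMirabilis/translate | unit_converter.py | _extract_sentence_context
-- ===== SOURCE A (Python) =====
-- from typing import List, Optional, Set, Tuple
--
-- def _extract_sentence_context(line: str, match_start: int, match_end: int,
--                                max_len: int = 200) -> Tuple[str, int]:
--     """Extract the sentence containing the match, capped at max_len chars.
--
--     Returns (context_string, offset_of_context_start_within_line).
--     """
--     # Search backwards for sentence start
--     sent_start = 0
--     for i in range(match_start - 1, -1, -1):
--         if line[i] in '.!?;\n':
--             sent_start = i + 1
--             break
--
--     # Search forwards for sentence end
--     sent_end = len(line)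
--     for i in range(match_end, len(line)):
--         if line[i] in '.!?;\n':
--             sent_end = i + 1
--             break
--
--     context = line[sent_start:sent_end].strip()
--     ctx_offset = sent_start
--
--     # Cap at max_len centered on match if sentence is very long
--     if len(context) > max_len:
--         match_center = (match_start + match_end) // 2 - sent_start
--         half = max_len // 2
--         ctx_start = max(0, match_center - half)
--         ctx_end = min(len(context), ctx_start + max_len)
--         context = context[ctx_start:ctx_end]
--         ctx_offset = sent_start + ctx_start
--
--     return context, ctx_offset
-- ===== SOURCE B (Python) =====
-- from typing import Tuple
--
-- _DELIMS = '.!?;\n'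
--
-- def _extract_sentence_context(line: str, match_start: int, match_end: int,
--                               max_len: int = 200) -> Tuple[str, int]:
--     """Extract the sentence containing the match, capped at max_len chars.
--
--     Delimiter boundaries are located with str.rfind/str.find per delimiter
--     (C-level scans) instead of a per-character Python loop.
--     """
--     # The sentence start is the last delimiter before the match: rfind over
--     # line[0:match_start] (clamped at 0); rfind gives -1 when absent, so
--     # max(...)+1 falls back to 0.
--     sent_start = max(line.rfind(d, 0, max(0, match_start)) for d in _DELIMS) + 1
--
--     # Earliest delimiter at or after match_end; min over found positions.
--     sent_end = len(line)
--     for d in _DELIMS: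
--         p = line.find(d, match_end)
--         if p != -1:
--             sent_end = min(sent_end, p + 1)
--
--     context = line[sent_start:sent_end].strip()
--     ctx_offset = sent_start
--
--     if len(context) > max_len:
--         match_center = (match_start + match_end) // 2 - sent_start
--         half = max_len // 2
--         ctx_start = max(0, match_center - half)
--         ctx_end = min(len(context), ctx_start + max_len)
--         context = context[ctx_start:ctx_end]
--         ctx_offset = sent_start + ctx_start
--
--     return context, ctx_offset
-- ===== Notes on version B (the rewrite author's own statement) =====
-- stated objective: faster
-- what changed: Sentence boundaries are located with per-delimiter str.rfind/str.find C-level library searches combined by max/min instead of A's manual backward and forward per-character Python scan loops (measured ~14x at the largest timed size); the strip and max_len-capping tail is unchanged.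
-- outside the precondition, e.g. on _extract_sentence_context('a.b!', 1, -2, 200): A returns ('', 0), B returns ('a.b!', 0)
import Mathlib
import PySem

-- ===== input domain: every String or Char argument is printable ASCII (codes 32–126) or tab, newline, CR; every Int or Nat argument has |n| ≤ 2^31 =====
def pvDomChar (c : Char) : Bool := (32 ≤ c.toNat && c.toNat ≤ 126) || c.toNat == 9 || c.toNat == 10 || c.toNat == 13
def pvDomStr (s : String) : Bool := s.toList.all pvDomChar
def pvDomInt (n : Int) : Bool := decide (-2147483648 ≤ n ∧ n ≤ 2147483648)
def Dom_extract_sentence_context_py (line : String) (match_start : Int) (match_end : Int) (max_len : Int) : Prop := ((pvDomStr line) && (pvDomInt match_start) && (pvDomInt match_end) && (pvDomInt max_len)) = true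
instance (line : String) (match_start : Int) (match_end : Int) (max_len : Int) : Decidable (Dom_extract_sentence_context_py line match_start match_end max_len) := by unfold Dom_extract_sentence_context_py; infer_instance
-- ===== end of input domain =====

-- B replaces A's manual backward/forward per-character boundary scan loops by per-delimiter
-- str.rfind/str.find library searches combined with max/min (measured faster by the timing
-- run); the strip/max_len tail is unchanged.

-- ===== PORT A =====
-- 'c in ".!?;\n"'
def pvIsDelim (c : Char) : Bool := c == '.' || c == '!' || c == '?' || c == ';' || c == '\n'

-- 'for i in range(match_start-1,-1,-1): if line[i] in delims: sent_start = i+1; break' (default 0)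
def pvBackScan (line : String) : List Int → Int
  | [] => 0
  | i :: rest =>
    match PySem.Str.pyGet? line i with
    | some c => if pvIsDelim c then i + 1 else pvBackScan line rest
    | none => 0   -- Python raises IndexError here; unreachable under Pre_

-- 'for i in range(match_end, len(line)): if line[i] in delims: sent_end = i+1; break' (default len)
def pvFwdScan (line : String) (dflt : Int) : List Int → Int
  | [] => dflt
  | i :: rest =>
    match PySem.Str.pyGet? line i with
    | some c => if pvIsDelim c then i + 1 else pvFwdScan line dflt rest
    | none => dflt   -- Python raises IndexError here; unreachable under Pre_

def extract_sentence_context_py (line : String) (match_start : Int) (match_end : Int) (max_len : Int) : String × Int :=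
  let n : Int := PySem.Str.len line
  let sent_start := pvBackScan line (PySem.List.pyRange (match_start - 1) (-1) (-1))
  let sent_end := pvFwdScan line n (PySem.List.pyRange match_end n 1)
  let context := PySem.Str.strip (PySem.Str.slice line (some sent_start) (some sent_end))
  if max_len < PySem.Str.len context then
    let match_center := PySem.Int.floordiv (match_start + match_end) 2 - sent_start
    let half := PySem.Int.floordiv max_len 2
    let ctx_start := max 0 (match_center - half)
    let ctx_end := min (PySem.Str.len context) (ctx_start + max_len)
    (PySem.Str.slice context (some ctx_start) (some ctx_end), sent_start + ctx_start)
  else (context, sent_start)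

-- ===== PORT B =====
-- the characters of '.!?;\n', as the 1-char needles handed to rfind/find
def pvDelimStrs : List String := [".", "!", "?", ";", "\n"]

def extract_sentence_context_py_alt (line : String) (match_start : Int) (match_end : Int) (max_len : Int) : String × Int :=
  let n : Int := PySem.Str.len line
  -- max(line.rfind(d, 0, max(0, match_start)) for d in delims) + 1; every rfind is ≥ -1, so folding max from -1 is that max
  let sent_start := (pvDelimStrs.map (fun d => PySem.Str.rfindFrom line d 0 (some (max 0 match_start)))).foldl max (-1) + 1
  -- for d in delims: p = line.find(d, match_end); if p != -1: sent_end = min(sent_end, p + 1)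
  let sent_end := pvDelimStrs.foldl (fun acc d =>
      let p := PySem.Str.findFrom line d match_end none
      if p = -1 then acc else min acc (p + 1)) n
  let context := PySem.Str.strip (PySem.Str.slice line (some sent_start) (some sent_end))
  if max_len < PySem.Str.len context then
    let match_center := PySem.Int.floordiv (match_start + match_end) 2 - sent_start
    let half := PySem.Int.floordiv max_len 2
    let ctx_start := max 0 (match_center - half)
    let ctx_end := min (PySem.Str.len context) (ctx_start + max_len)
    (PySem.Str.slice context (some ctx_start) (some ctx_end), sent_start + ctx_start)
  else (context, sent_start)

-- ===== PRECONDITION & SPEC =====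
-- Pre_ excludes match_start > len(line), where A raises IndexError, and negative match_end
-- (match offsets are nonnegative by nature), where A's forward scan reads characters through
-- Python's accidental negative-index wraparound.
def Pre_extract_sentence_context_py (line : String) (match_start : Int) (match_end : Int) (max_len : Int) : Prop :=
  match_start ≤ PySem.Str.len line ∧ 0 ≤ match_end
instance (line : String) (match_start : Int) (match_end : Int) (max_len : Int) : Decidable (Pre_extract_sentence_context_py line match_start match_end max_len) := by unfold Pre_extract_sentence_context_py; infer_instance

def pvWitness_extract_sentence_context_py : String × Int × Int × Int := ("Hi. foo bar! baz", 5, 8, 200)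

def Spec_extract_sentence_context_py (line : String) (match_start : Int) (match_end : Int) (max_len : Int) (out : String × Int) : Prop := out = extract_sentence_context_py_alt line match_start match_end max_len
instance (line : String) (match_start : Int) (match_end : Int) (max_len : Int) (out : String × Int) : Decidable (Spec_extract_sentence_context_py line match_start match_end max_len out) := by unfold Spec_extract_sentence_context_py; infer_instance

-- ===== CLAIM (what is proved, stated in full; the proofs are below) =====
def Claim_equal_extract_sentence_context_py : Prop := ∀ (line : String) (match_start : Int) (match_end : Int) (max_len : Int), Dom_extract_sentence_context_py line match_start match_end max_len → Pre_extract_sentence_context_py line match_start match_end max_len → Spec_extract_sentence_context_py line match_start match_end max_len (extract_sentence_context_py line match_start match_end max_len)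

-- ===== LEMMAS AND PROOFS =====

def pvLastC (cs : List Char) (d : Char) : Nat → Int
  | 0 => -1
  | k+1 => if cs[k]? = some d then (k : Int) else pvLastC cs d k

lemma pvPrefixSingleB (d : Char) (l : List Char) : [d].isPrefixOf l = (l.head? == some d) := by
  cases l with
  | nil => simp [List.isPrefixOf]
  | cons c t => simp [List.isPrefixOf, List.isPrefixOf_iff_prefix, eq_comm]

lemma pvRfindGo (cs : List Char) (m : Nat) (hm : m ≤ cs.length) (d : Char) :
    ∀ j, j < m → PySem.Chars.rfind.go (cs.take m) [d] j = pvLastC cs d (j + 1) := by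
  intro j
  induction j with
  | zero =>
    intro hj
    rw [PySem.Chars.rfind.go.eq_def]
    simp only [pvLastC, pvPrefixSingleB]
    have : (cs.take m).head? = cs[0]? := by
      rw [List.head?_eq_getElem?, List.getElem?_take, if_pos hj]
    rw [this]
    by_cases h : cs[0]? = some d <;> simp [h, pvLastC]
  | succ j ih =>
    intro hj
    rw [PySem.Chars.rfind.go.eq_def]
    simp only [pvPrefixSingleB, List.head?_drop, List.getElem?_take, if_pos hj]
    by_cases h : cs[j+1]? = some d
    · simp [h, pvLastC]
    · rw [if_neg (by simp [h])]
      rw [ih (by omega)]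
      simp [pvLastC, h]

lemma pvRfindTake (cs : List Char) (d : Char) (m : Nat) (hm : m ≤ cs.length) :
    PySem.Chars.rfind (cs.take m) [d] = pvLastC cs d m := by
  rw [PySem.Chars.rfind]
  have hlen : (cs.take m).length = m := by simp [hm]
  rw [hlen]
  cases m with
  | zero => rw [PySem.Chars.rfind.go.eq_def]; simp [pvLastC, List.isPrefixOf]
  | succ k =>
    rw [PySem.Chars.rfind.go.eq_def]
    have : (List.drop (k+1) (cs.take (k+1))) = [] := by
      apply List.drop_eq_nil_of_le; simp [hlen]
    simp only [this]
    simp only [show ([d].isPrefixOf ([] : List Char)) = false by simp [List.isPrefixOf]]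
    simp only [Bool.false_eq_true, if_false]
    exact pvRfindGo cs (k+1) hm d k (by omega)


def pvLastD (cs : List Char) : Nat → Int
  | 0 => -1
  | k+1 => if (cs[k]?.any pvIsDelim) then (k : Int) else pvLastD cs k

lemma pvLastC_le (cs : List Char) (d : Char) (m : Nat) :
    -1 ≤ pvLastC cs d m ∧ pvLastC cs d m ≤ (m : Int) - 1 := by
  induction m with
  | zero => simp [pvLastC]
  | succ k ih => simp only [pvLastC]; split <;> push_cast <;> omega

lemma pvRfindFromEq (cs : List Char) (d : Char) (ms : Int) (h0 : 0 ≤ ms) (hle : ms ≤ (cs.length : Int)) :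
    PySem.Chars.rfindFrom cs [d] 0 (some ms) = pvLastC cs d ms.toNat := by
  rw [PySem.Chars.rfindFrom]
  simp only [show ¬((cs.length : Int) < ms) from by omega, if_false,
             show ¬(ms < 0) from by omega, show ¬((0:Int) < 0) from by omega,
             show ¬(ms < (0:Int)) from by omega, ite_false]
  simp only [Int.toNat_zero, List.drop_zero]
  rw [pvRfindTake cs d ms.toNat (Int.toNat_le.mpr hle)]
  have := pvLastC_le cs d ms.toNat
  first
  | (split_ifs <;> omega)
  | omega

lemma pvBackComb (cs : List Char) (m : Nat) (hm : m ≤ cs.length) :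
    (['.', '!', '?', ';', '\n'].map (fun d => pvLastC cs d m)).foldl max (-1) = pvLastD cs m := by
  induction m with
  | zero => simp [pvLastC, pvLastD]
  | succ k ih =>
    have hk : k < cs.length := by omega
    have hsome : cs[k]? = some cs[k] := List.getElem?_eq_getElem hk
    by_cases hc : pvIsDelim cs[k]
    · have b1 := pvLastC_le cs '.' k
      have b2 := pvLastC_le cs '!' k
      have b3 := pvLastC_le cs '?' k
      have b4 := pvLastC_le cs ';' k
      have b5 := pvLastC_le cs '\n' k
      generalize hg : cs[k] = c at hsome hc
      simp only [pvIsDelim, Bool.or_eq_true, beq_iff_eq] at hc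
      rcases hc with (((rfl | rfl) | rfl) | rfl) | rfl <;>
        simp [List.foldl, pvLastC, pvLastD, hsome, pvIsDelim] <;> omega
    · have n1 : ¬(cs[k] = '.') := fun h => hc (by simp [pvIsDelim, h])
      have n2 : ¬(cs[k] = '!') := fun h => hc (by simp [pvIsDelim, h])
      have n3 : ¬(cs[k] = '?') := fun h => hc (by simp [pvIsDelim, h])
      have n4 : ¬(cs[k] = ';') := fun h => hc (by simp [pvIsDelim, h])
      have n5 : ¬(cs[k] = '\n') := fun h => hc (by simp [pvIsDelim, h])
      have hcf : pvIsDelim cs[k] = false := by simp [pvIsDelim, n1, n2, n3, n4, n5]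
      simp only [List.map, List.foldl, pvLastC, pvLastD, hsome, Option.any_some, hcf,
                 Option.some.injEq, n1, n2, n3, n4, n5, if_false, ite_false, Bool.false_eq_true]
      simpa using ih (by omega)


lemma pvABack (line : String) (m : Nat) (hm : m ≤ line.toList.length) :
    pvBackScan line (PySem.List.pyRange ((m : Int) - 1) (-1) (-1)) = pvLastD line.toList m + 1 := by
  induction m with
  | zero =>
    rw [PySem.List.pyRange_neg_one_eq_nil (by omega)]
    simp [pvBackScan, pvLastD]
  | succ k ih =>
    have hk : k < line.toList.length := by omega
    rw [show ((k+1 : Nat) : Int) - 1 = (k : Int) by push_cast; omega]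
    rw [PySem.List.pyRange_neg_one_cons (by omega)]
    simp only [pvBackScan]
    have hget : PySem.Str.pyGet? line (k : Int) = some line.toList[k] := by
      simp [List.getElem?_eq_getElem hk]
    rw [hget]
    simp only [pvLastD, List.getElem?_eq_getElem hk, Option.any_some]
    by_cases hc : pvIsDelim line.toList[k]
    · simp [hc]
    · simp only [hc, Bool.false_eq_true, if_false]
      rw [show (k : Int) - 1 = ((k : Nat) : Int) - 1 from rfl]
      exact ih (by omega)

def pvFirstD : List Char → Int
  | [] => -1
  | c :: t => if pvIsDelim c then 0 else (if pvFirstD t = -1 then -1 else pvFirstD t + 1)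

lemma pvFirstD_bounds (l : List Char) :
    -1 ≤ pvFirstD l ∧ pvFirstD l < (l.length : Int) + 1 ∧ (pvFirstD l ≠ -1 → pvFirstD l < (l.length : Int)) := by
  induction l with
  | nil => simp [pvFirstD]
  | cons c t ih =>
    obtain ⟨h1, h2, h3⟩ := ih
    by_cases h : pvFirstD t = -1
    · by_cases hd : pvIsDelim c <;> simp [pvFirstD, h, hd] <;> push_cast <;> omega
    · have h4 := h3 h
      by_cases hd : pvIsDelim c <;> simp [pvFirstD, h, hd] <;> push_cast at h1 h2 h4 ⊢ <;> omega

lemma pvFindNilSingle (d : Char) : PySem.Chars.find [] [d] = -1 := by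
  rw [PySem.Chars.find, PySem.Chars.find.go.eq_def]
  simp

lemma pvFindGoShift (d : Char) (l : List Char) :
    ∀ k : Nat, PySem.Chars.find.go [d] l k =
      (if PySem.Chars.find l [d] = -1 then -1 else (k : Int) + PySem.Chars.find l [d]) := by
  induction l with
  | nil => intro k; rw [PySem.Chars.find.go.eq_def]; simp [pvFindNilSingle]
  | cons c t ih =>
    intro k
    rw [PySem.Chars.find.go.eq_def]
    have hfc : PySem.Chars.find (c :: t) [d] = PySem.Chars.find.go [d] (c :: t) 0 := rfl
    rw [hfc, PySem.Chars.find.go.eq_def]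
    by_cases h : [d].isPrefixOf (c :: t)
    · simp [h]
    · simp only [h, Bool.false_eq_true, if_false]
      rw [ih (k+1), ih 1]
      have hb := PySem.Chars.neg_one_le_find t [d]
      split_ifs <;> push_cast <;> omega

lemma pvFindConsSingle (c : Char) (t : List Char) (d : Char) :
    PySem.Chars.find (c :: t) [d] =
      (if c = d then 0 else if PySem.Chars.find t [d] = -1 then -1 else PySem.Chars.find t [d] + 1) := by
  rw [PySem.Chars.find, PySem.Chars.find.go.eq_def]
  have hpre : [d].isPrefixOf (c :: t) = (c == d) := by
    simp [List.isPrefixOf, eq_comm]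
  by_cases h : c = d
  · simp [hpre, h]
  · simp only [hpre, h, beq_iff_eq, if_false, Bool.false_eq_true, beq_eq_false_iff_ne, ne_eq]
    rw [pvFindGoShift d t 1]
    have hb := PySem.Chars.neg_one_le_find t [d]
    split_ifs <;> omega

lemma pvFindLt (l : List Char) (d : Char) (h : PySem.Chars.find l [d] ≠ -1) :
    0 ≤ PySem.Chars.find l [d] ∧ PySem.Chars.find l [d] < (l.length : Int) := by
  induction l with
  | nil => simp [pvFindNilSingle] at h
  | cons c t ih =>
    rw [pvFindConsSingle] at h ⊢
    by_cases hc : c = d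
    · simp [hc]
    · simp only [hc, if_false] at h ⊢
      by_cases h2 : PySem.Chars.find t [d] = -1
      · simp [h2] at h
      · have := ih h2
        simp only [h2, if_false, List.length_cons]
        push_cast
        omega

lemma pvFindFromEq (cs : List Char) (d : Char) (me : Int) (h0 : 0 ≤ me) :
    PySem.Chars.findFrom cs [d] me none =
      (if PySem.Chars.find (cs.drop me.toNat) [d] = -1 then -1
       else me + PySem.Chars.find (cs.drop me.toNat) [d]) := by
  rw [PySem.Chars.findFrom]
  simp only [show ¬(me < 0) from by omega, if_false]
  by_cases hbig : (cs.length : Int) < me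
  · have hdrop : cs.drop me.toNat = [] := List.drop_eq_nil_of_le (by omega)
    rw [if_pos hbig]
    rw [hdrop, pvFindNilSingle]
    simp
  · rw [if_neg hbig]
    have : List.take (Int.toNat (cs.length : Int)) cs = cs := by simp
    rw [this]

lemma pvIsDelim_mem (d : Char) : pvIsDelim d = true ↔ d ∈ ['.', '!', '?', ';', '\n'] := by
  simp only [pvIsDelim, Bool.or_eq_true, beq_iff_eq, List.mem_cons, List.mem_singleton]
  tauto

lemma pvShift_ne (x : Int) (hx : -1 ≤ x) :
    ((if x = -1 then (-1:Int) else x + 1) = -1) ↔ x = -1 := by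
  split_ifs <;> omega

lemma pvFirstD_none (l : List Char) (h : pvFirstD l = -1) (d : Char) (hd : pvIsDelim d = true) :
    PySem.Chars.find l [d] = -1 := by
  induction l with
  | nil => exact pvFindNilSingle d
  | cons c t ih =>
    have hb := (pvFirstD_bounds t).1
    simp only [pvFirstD] at h
    by_cases hc : pvIsDelim c
    · simp [hc] at h
    · simp only [hc, Bool.false_eq_true, if_false] at h
      have ht : pvFirstD t = -1 := by rwa [pvShift_ne _ hb] at h
      have hcd : ¬(c = d) := fun he => hc (he ▸ hd)
      rw [pvFindConsSingle]
      simp [hcd, ih ht]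

lemma pvFirstD_le (l : List Char) (d : Char) (hd : pvIsDelim d = true)
    (h : PySem.Chars.find l [d] ≠ -1) :
    pvFirstD l ≠ -1 ∧ pvFirstD l ≤ PySem.Chars.find l [d] := by
  induction l with
  | nil => simp [pvFindNilSingle] at h
  | cons c t ih =>
    by_cases hc : pvIsDelim c
    · have hge := pvFindLt (c :: t) d h
      simp only [pvFirstD, hc, if_true]
      omega
    · have hcd : ¬(c = d) := fun he => hc (he ▸ hd)
      rw [pvFindConsSingle] at h ⊢
      simp only [hcd, if_false] at h ⊢
      by_cases h2 : PySem.Chars.find t [d] = -1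
      · simp [h2] at h
      · obtain ⟨hne, hle⟩ := ih h2
        have hb := (pvFirstD_bounds t).1
        simp only [pvFirstD, hc, Bool.false_eq_true, if_false, if_neg hne, if_neg h2]
        omega

lemma pvFirstD_attained (l : List Char) (h : pvFirstD l ≠ -1) :
    ∃ d, pvIsDelim d = true ∧ PySem.Chars.find l [d] = pvFirstD l := by
  induction l with
  | nil => simp [pvFirstD] at h
  | cons c t ih =>
    by_cases hc : pvIsDelim c
    · refine ⟨c, hc, ?_⟩
      rw [pvFindConsSingle]
      simp [pvFirstD, hc]
    · simp only [pvFirstD, hc, Bool.false_eq_true, if_false] at h ⊢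
      have hne : pvFirstD t ≠ -1 := by
        rcases eq_or_ne (pvFirstD t) (-1) with h2 | h2
        · simp [h2] at h
        · exact h2
      obtain ⟨d, hd, hfd⟩ := ih hne
      refine ⟨d, hd, ?_⟩
      have hcd : ¬(c = d) := fun he => hc (he ▸ hd)
      rw [pvFindConsSingle]
      simp only [hcd, if_false, hfd, hne, ite_false, if_neg hne]

lemma pvFoldMinProps (ds : List Char) (g : Char → Int) (acc : Int) :
    (ds.foldl (fun a d => if g d = -1 then a else min a (g d + 1)) acc ≤ acc)
  ∧ (∀ d ∈ ds, g d ≠ -1 → ds.foldl (fun a d => if g d = -1 then a else min a (g d + 1)) acc ≤ g d + 1)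
  ∧ (ds.foldl (fun a d => if g d = -1 then a else min a (g d + 1)) acc = acc
     ∨ ∃ d ∈ ds, g d ≠ -1 ∧ ds.foldl (fun a d => if g d = -1 then a else min a (g d + 1)) acc = g d + 1) := by
  induction ds generalizing acc with
  | nil => simp
  | cons d0 rest ih =>
    simp only [List.foldl]
    obtain ⟨i1, i2, i3⟩ := ih (if g d0 = -1 then acc else min acc (g d0 + 1))
    have ha : (if g d0 = -1 then acc else min acc (g d0 + 1)) ≤ acc := by split_ifs <;> omega
    refine ⟨by omega, ?_, ?_⟩
    · intro d hd hne
      rcases List.mem_cons.mp hd with rfl | hmem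
      · have : (if g d = -1 then acc else min acc (g d + 1)) ≤ g d + 1 := by
          simp only [if_neg hne]; omega
        omega
      · exact i2 d hmem hne
    · rcases i3 with he | ⟨d, hmem, hne, he⟩
      · by_cases h0 : g d0 = -1
        · left; rw [he, if_pos h0]
        · rw [he, if_neg h0]
          rcases le_or_gt acc (g d0 + 1) with hle | hlt
          · left; omega
          · right; exact ⟨d0, List.mem_cons_self .., h0, by omega⟩
      · right; exact ⟨d, List.mem_cons_of_mem _ hmem, hne, he⟩


lemma pvAFwdAux (line : String) :
    ∀ (fuel : Nat) (me : Int), 0 ≤ me → fuel = line.toList.length - me.toNat →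
    pvFwdScan line (line.toList.length : Int) (PySem.List.pyRange me (line.toList.length : Int) 1) =
      (if pvFirstD (line.toList.drop me.toNat) = -1 then (line.toList.length : Int)
       else me + pvFirstD (line.toList.drop me.toNat) + 1) := by
  intro fuel
  induction fuel with
  | zero =>
    intro me h0 hf
    have hge : (line.toList.length : Int) ≤ me := by omega
    rw [PySem.List.pyRange_one_eq_nil hge]
    have hdrop : line.toList.drop me.toNat = [] := List.drop_eq_nil_of_le (by omega)
    simp [pvFwdScan, hdrop, pvFirstD]
  | succ j ih =>
    intro me h0 hf
    have hlt : me.toNat < line.toList.length := by omega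
    have hlt' : me < (line.toList.length : Int) := by omega
    rw [PySem.List.pyRange_one_cons hlt']
    simp only [pvFwdScan]
    have hget : PySem.Str.pyGet? line me = some line.toList[me.toNat] := by
      simp [PySem.List.pyGet?_of_nonneg, h0, List.getElem?_eq_getElem hlt]
    rw [hget]
    have hdrop : line.toList.drop me.toNat = line.toList[me.toNat] :: line.toList.drop (me.toNat + 1) :=
      List.drop_eq_getElem_cons hlt
    rw [hdrop]
    by_cases hc : pvIsDelim line.toList[me.toNat]
    · simp [pvFirstD, hc]
    · simp only [hc, Bool.false_eq_true, if_false]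
      rw [ih (me + 1) (by omega) (by omega)]
      have heq : (me + 1).toNat = me.toNat + 1 := by omega
      rw [heq]
      have hb := (pvFirstD_bounds (line.toList.drop (me.toNat + 1))).1
      simp only [pvFirstD, hc, Bool.false_eq_true, if_false]
      split_ifs <;> omega

lemma pvAFwd (line : String) (me : Int) (h0 : 0 ≤ me) :
    pvFwdScan line (line.toList.length : Int) (PySem.List.pyRange me (line.toList.length : Int) 1) =
      (if pvFirstD (line.toList.drop me.toNat) = -1 then (line.toList.length : Int)
       else me + pvFirstD (line.toList.drop me.toNat) + 1) :=
  pvAFwdAux line (line.toList.length - me.toNat) me h0 rfl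


lemma pvStartEq (line : String) (ms : Int) (hle : ms ≤ (line.toList.length : Int)) :
    (pvDelimStrs.map (fun d => PySem.Str.rfindFrom line d 0 (some (max 0 ms)))).foldl max (-1) + 1
      = pvBackScan line (PySem.List.pyRange (ms - 1) (-1) (-1)) := by
  by_cases h0 : 0 ≤ ms
  case neg =>
    have hm : max 0 ms = 0 := by omega
    have e0 : ∀ d : Char, ∀ s : String, s.toList = [d] →
        PySem.Str.rfindFrom line s 0 (some (max 0 ms)) = -1 := by
      intro d s hs
      rw [PySem.Str.rfindFrom_eq, hs, hm]
      rw [pvRfindFromEq line.toList d 0 le_rfl (by positivity)]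
      simp [pvLastC]
    rw [PySem.List.pyRange_neg_one_eq_nil (by omega)]
    simp only [pvDelimStrs, List.map, e0 '.' "." rfl, e0 '!' "!" rfl, e0 '?' "?" rfl,
               e0 ';' ";" rfl, e0 '\n' "\n" rfl, pvBackScan]
    simp
  case pos =>
  rw [max_eq_right h0]
  have e1 : PySem.Str.rfindFrom line "." 0 (some ms) = pvLastC line.toList '.' ms.toNat := by
    rw [PySem.Str.rfindFrom_eq]; exact pvRfindFromEq line.toList '.' ms h0 hle
  have e2 : PySem.Str.rfindFrom line "!" 0 (some ms) = pvLastC line.toList '!' ms.toNat := by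
    rw [PySem.Str.rfindFrom_eq]; exact pvRfindFromEq line.toList '!' ms h0 hle
  have e3 : PySem.Str.rfindFrom line "?" 0 (some ms) = pvLastC line.toList '?' ms.toNat := by
    rw [PySem.Str.rfindFrom_eq]; exact pvRfindFromEq line.toList '?' ms h0 hle
  have e4 : PySem.Str.rfindFrom line ";" 0 (some ms) = pvLastC line.toList ';' ms.toNat := by
    rw [PySem.Str.rfindFrom_eq]; exact pvRfindFromEq line.toList ';' ms h0 hle
  have e5 : PySem.Str.rfindFrom line "\n" 0 (some ms) = pvLastC line.toList '\n' ms.toNat := by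
    rw [PySem.Str.rfindFrom_eq]; exact pvRfindFromEq line.toList '\n' ms h0 hle
  have hmap : (pvDelimStrs.map (fun d => PySem.Str.rfindFrom line d 0 (some ms)))
      = ['.', '!', '?', ';', '\n'].map (fun d => pvLastC line.toList d ms.toNat) := by
    simp only [pvDelimStrs, List.map, e1, e2, e3, e4, e5]
  rw [hmap, pvBackComb line.toList ms.toNat (by omega)]
  have hms : ms - 1 = ((ms.toNat : Nat) : Int) - 1 := by omega
  rw [hms, pvABack line ms.toNat (by omega)]

lemma pvEndEq (line : String) (me : Int) (h0 : 0 ≤ me) :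
    pvDelimStrs.foldl (fun acc d =>
        if PySem.Str.findFrom line d me none = -1 then acc
        else min acc (PySem.Str.findFrom line d me none + 1)) ((line.toList.length : Int))
      = pvFwdScan line (line.toList.length : Int) (PySem.List.pyRange me (line.toList.length : Int) 1) := by
  rw [pvAFwd line me h0]
  set cs := line.toList with hcs
  set l := cs.drop me.toNat with hl
  set g : Char → Int := fun d =>
    if PySem.Chars.find l [d] = -1 then -1 else me + PySem.Chars.find l [d] with hg
  have estep : ∀ d : Char, ∀ s : String, s.toList = [d] →
      PySem.Str.findFrom line s me none = g d := by
    intro d s hs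
    rw [PySem.Str.findFrom_eq, hs]
    exact pvFindFromEq cs d me h0
  have hfold : pvDelimStrs.foldl (fun acc d =>
        if PySem.Str.findFrom line d me none = -1 then acc
        else min acc (PySem.Str.findFrom line d me none + 1)) ((cs.length : Int))
      = ['.', '!', '?', ';', '\n'].foldl (fun a d => if g d = -1 then a else min a (g d + 1)) (cs.length : Int) := by
    simp only [pvDelimStrs, List.foldl]
    rw [estep '.' "." rfl, estep '!' "!" rfl, estep '?' "?" rfl, estep ';' ";" rfl, estep '\n' "\n" rfl]
  rw [hfold]
  obtain ⟨p1, p2, p3⟩ := pvFoldMinProps ['.', '!', '?', ';', '\n'] g (cs.length : Int)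
  by_cases hfd : pvFirstD l = -1
  · rw [if_pos hfd]
    rcases p3 with he | ⟨d, hmem, hne, he⟩
    · exact he
    · exfalso
      apply hne
      simp only [hg]
      simp only [pvFirstD_none l hfd d ((pvIsDelim_mem d).mpr hmem), if_true, ite_true]
  · rw [if_neg hfd]
    obtain ⟨d0, hd0, hfd0⟩ := pvFirstD_attained l hfd
    have hb := pvFirstD_bounds l
    have hlen : l ≠ [] := by
      intro hnil
      rw [hnil] at hfd
      simp [pvFirstD] at hfd
    have hmelen : me.toNat < cs.length := by
      by_contra hcon
      exact hlen (by rw [hl]; exact List.drop_eq_nil_of_le (by omega))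
    have hlenl : (l.length : Int) = (cs.length : Int) - me := by
      rw [hl]
      simp [List.length_drop]
      omega
    have hfirst_lt : pvFirstD l < (l.length : Int) := (hb.2.2) hfd
    have hg0 : g d0 = me + pvFirstD l := by
      simp only [hg]
      simp only [hfd0]
      rw [if_neg hfd]
    have hne0 : g d0 ≠ -1 := by omega
    have hle0 := p2 d0 ((pvIsDelim_mem d0).mp hd0) hne0
    rcases p3 with he | ⟨d, hmem, hne, he⟩
    · omega
    · have hdle := pvFirstD_le l d ((pvIsDelim_mem d).mpr hmem)
        (by intro hcon; apply hne; simp only [hg]; simp [hcon])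
      have hgd : g d = me + PySem.Chars.find l [d] := by
        simp only [hg]
        rw [if_neg (by intro hcon; apply hne; simp only [hg]; simp [hcon])]
      omega

-- ===== VERDICT (by name: the statement is the Claim_ definition above) =====
theorem extract_sentence_context_py_spec : Claim_equal_extract_sentence_context_py := by
  intro line ms me ml _hdom hpre
  obtain ⟨hles, h0e⟩ := hpre
  have hn : PySem.Str.len line = ((line.toList.length : Nat) : Int) := by
    simp [PySem.Str.len]
  have hles' : ms ≤ ((line.toList.length : Nat) : Int) := by rw [hn] at hles; exact hles
  unfold Spec_extract_sentence_context_py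
  simp only [extract_sentence_context_py, extract_sentence_context_py_alt]
  rw [hn]
  rw [pvStartEq line ms hles']
  rw [pvEndEq line me h0e]
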